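-- pv_equiv track=rewrite | github.com/AvocadoMoon/Secret-Santa | SecretSanta.py | closestValues
-- ===== SOURCE A (Python) =====
-- def closestValues(list, i, n):
--     l = i - (n//2)
--     r = i + (n//2)
--
--     #if the list is not long enough on the left side, compensate with the right and vice versa
--     while l < 0:
--         r += 1
--         l += 1
--     if l == i:
--         l += 1
--     while r > (len(list) - 1):
--         r -= 1
--         l -= 1
--     if r == i:
--         r -= 1
--     return l, r
-- ===== SOURCE B (Python) =====
-- def closestValues(list, i, n):
--     half = n // 2
--     l = i - half
--     r = i + half
--     if l < 0:            # closed-form clamp instead of A's increment loop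
--         r -= l
--         l = 0
--     if l == i:
--         l += 1
--     last = len(list) - 1
--     if r > last:         # closed-form clamp instead of A's decrement loop
--         l -= r - last
--         r = last
--     if r == i:
--         r -= 1
--     return l, r
-- ===== Notes on version B (the rewrite author's own statement) =====
-- stated objective: simpler
-- what changed: Both unbounded unit-step while loops are replaced by closed-form arithmetic clamps (shift the window by the overflow in one step), keeping the interleaved ==i adjustments in place.
import Mathlib
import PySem

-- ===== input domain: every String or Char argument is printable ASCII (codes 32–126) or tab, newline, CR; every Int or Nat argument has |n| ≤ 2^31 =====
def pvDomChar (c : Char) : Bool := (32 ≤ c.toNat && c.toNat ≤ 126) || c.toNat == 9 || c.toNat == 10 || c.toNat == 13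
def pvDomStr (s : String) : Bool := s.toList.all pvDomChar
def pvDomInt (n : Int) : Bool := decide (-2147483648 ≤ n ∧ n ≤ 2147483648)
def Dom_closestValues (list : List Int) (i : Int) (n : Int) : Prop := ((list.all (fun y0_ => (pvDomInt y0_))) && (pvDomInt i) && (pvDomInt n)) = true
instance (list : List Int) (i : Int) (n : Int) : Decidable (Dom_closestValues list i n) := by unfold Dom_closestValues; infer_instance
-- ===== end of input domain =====

-- B replaces A's two unit-step while loops by closed-form arithmetic clamps; same return value.
-- ===== PORT A =====
-- while l < 0: r += 1; l += 1
def pvLoopL (l r : Int) : Int × Int :=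
  if l < 0 then pvLoopL (l + 1) (r + 1) else (l, r)
termination_by (-l).toNat
decreasing_by omega

-- while r > len(list) - 1: r -= 1; l -= 1
def pvLoopR (last l r : Int) : Int × Int :=
  if r > last then pvLoopR last (l - 1) (r - 1) else (l, r)
termination_by (r - last).toNat
decreasing_by omega

def closestValues (list : List Int) (i : Int) (n : Int) : Int × Int :=
  let l := i - PySem.Int.floordiv n 2
  let r := i + PySem.Int.floordiv n 2
  let p := pvLoopL l r
  let l := p.1
  let r := p.2
  let l := if l = i then l + 1 else l
  let q := pvLoopR ((list.length : Int) - 1) l r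
  let l := q.1
  let r := q.2
  let r := if r = i then r - 1 else r
  (l, r)

-- ===== PORT B =====
def closestValues_alt (list : List Int) (i : Int) (n : Int) : Int × Int :=
  let half := PySem.Int.floordiv n 2
  let l := i - half
  let r := i + half
  let (l, r) := if l < 0 then (0, r - l) else (l, r)
  let l := if l = i then l + 1 else l
  let last := (list.length : Int) - 1
  let (l, r) := if r > last then (l - (r - last), last) else (l, r)
  let r := if r = i then r - 1 else r
  (l, r)

-- ===== PRECONDITION & SPEC =====
def Spec_closestValues (list : List Int) (i : Int) (n : Int) (out : Int × Int) : Prop := out = closestValues_alt list i n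
instance (list : List Int) (i : Int) (n : Int) (out : Int × Int) : Decidable (Spec_closestValues list i n out) := by unfold Spec_closestValues; infer_instance

-- ===== CLAIM (what is proved, stated in full; the proofs are below) =====
def Claim_equal_closestValues : Prop := ∀ (list : List Int) (i : Int) (n : Int), Dom_closestValues list i n → Spec_closestValues list i n (closestValues list i n)

-- ===== LEMMAS AND PROOFS =====

-- ===== VERDICT (by name: the statement is the Claim_ definition above) =====
theorem pvLoopL_eq (l r : Int) : pvLoopL l r = if l < 0 then (0, r - l) else (l, r) := by
  induction l, r using pvLoopL.induct with
  | case1 l r h ih => rw [pvLoopL, if_pos h, ih]; split_ifs <;> simp_all <;> omega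
  | case2 l r h => rw [pvLoopL, if_neg h, if_neg h]

theorem pvLoopR_eq (last l r : Int) :
    pvLoopR last l r = if r > last then (l - (r - last), last) else (l, r) := by
  induction l, r using pvLoopR.induct last with
  | case1 l r h ih => rw [pvLoopR, if_pos h, ih]; split_ifs <;> simp_all <;> omega
  | case2 l r h => rw [pvLoopR, if_neg h, if_neg h]

theorem closestValues_spec : Claim_equal_closestValues := by
  intro list i n _
  unfold Spec_closestValues closestValues closestValues_alt
  simp only [pvLoopL_eq, pvLoopR_eq]
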